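-- pv_equiv track=rewrite | github.com/olejnik-tech/pythoneuler | 007.py | excludeIteration
-- ===== SOURCE A (Python) =====
-- def excludeIteration(matrix, iteration):
--     finalMatrix = matrix
--     beginningFlag = True
--
--     for i in matrix:
--         if (i > iteration) and (not beginningFlag):
--             if not i%iteration:
--                 finalMatrix.remove(i)
--
--         beginningFlag = False
--     return finalMatrix
-- ===== SOURCE B (Python) =====
-- def excludeIteration(matrix, iteration):
--     """Keep the leading element; drop every later element that is a multiple of
--     iteration greater than iteration. (Pure: does not modify the input list.)"""
--     return matrix[:1] + [x for x in matrix[1:] if x <= iteration or x % iteration != 0]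
-- ===== Notes on version B (the rewrite author's own statement) =====
-- stated objective: simpler
-- what changed: A mutates the list while iterating over it, calling list.remove per hit; B is a pure one-liner that keeps the head and filters the tail in a single comprehension (return value only: A mutates its argument, B does not). Pre_ excludes lists where a removable multiple duplicates an earlier element, on which A's list.remove picks the first matching occurrence rather than the current one (first-vs-last-match accident), besides the iteration=0 inputs where both raise ZeroDivisionError.
-- intended difference: On lists whose tail contains two adjacent removable multiples, A's remove-while-iterating skips the element right after each removal and leaves that multiple in (A([2,4,8,3],2)=[2,8,3]); B drops every later multiple ([2,3]), the intended sieve result. — e.g. on excludeIteration([2, 4, 8, 3], 2): A returns [2, 8, 3], B returns [2, 3]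
-- outside the precondition, e.g. on excludeIteration([4, 1, 4], 2): A returns [1, 4], B returns [4, 1]; on excludeIteration([1, 2], 0): A raises ZeroDivisionError, B raises ZeroDivisionError
import Mathlib
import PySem

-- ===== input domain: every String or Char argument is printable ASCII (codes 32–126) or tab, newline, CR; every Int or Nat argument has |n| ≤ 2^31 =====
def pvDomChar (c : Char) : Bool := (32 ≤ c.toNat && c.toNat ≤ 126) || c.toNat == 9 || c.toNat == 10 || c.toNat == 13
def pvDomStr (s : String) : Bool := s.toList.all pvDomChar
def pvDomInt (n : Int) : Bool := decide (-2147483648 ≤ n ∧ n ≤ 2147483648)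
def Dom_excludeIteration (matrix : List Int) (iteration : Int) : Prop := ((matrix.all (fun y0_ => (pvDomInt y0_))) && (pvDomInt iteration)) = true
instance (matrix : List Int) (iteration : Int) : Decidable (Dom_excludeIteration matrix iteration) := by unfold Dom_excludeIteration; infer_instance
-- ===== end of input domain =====

-- B keeps the head and filters the tail in one pure pass (A mutates its argument in place;
-- the equivalence proved here is about the return value only); A's remove-while-iterating
-- skip is stated as an intended difference D_ below, and the duplicate-removal corner of
-- list.remove (first-vs-last match) is excluded by Pre_.

-- ===== PORT A =====

-- list.remove(x) when x is known to be present (A only calls it on an element of the list)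
def pyRemove : List Int → Int → List Int
  | [], _ => []
  | a :: t, x => if a = x then t else a :: pyRemove t x

theorem pyRemove_length_le (l : List Int) (x : Int) : (pyRemove l x).length ≤ l.length := by
  induction l with
  | nil => simp [pyRemove]
  | cons a t ih =>
    by_cases h : a = x
    · simp [pyRemove, h]
    · simp [pyRemove, h]; omega

-- CPython's `for i in matrix` over the mutating list: an index-based loop.
def aLoop (lst : List Int) (idx : Nat) (iteration : Int) (first : Bool) : List Int :=
  if h : idx < lst.length then
    let i := lst[idx]
    if i > iteration ∧ first = false then
      if PySem.Int.mod i iteration = 0 then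
        aLoop (pyRemove lst i) (idx + 1) iteration false
      else
        aLoop lst (idx + 1) iteration false
    else
      aLoop lst (idx + 1) iteration false
  else lst
termination_by lst.length - idx
decreasing_by
  · have := pyRemove_length_le lst lst[idx]; omega
  · omega
  · omega

def excludeIteration (matrix : List Int) (iteration : Int) : List Int :=
  aLoop matrix 0 iteration true

-- ===== PORT B =====
-- matrix[:1] ++ [x for x in matrix[1:] if x <= iteration or x % iteration != 0]
def excludeIteration_alt (matrix : List Int) (iteration : Int) : List Int :=
  PySem.List.slice matrix none (some 1) ++
    (PySem.List.slice matrix (some 1) none).filter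
      (fun x => decide (x ≤ iteration) || !(PySem.Int.mod x iteration == 0))

-- ===== PRECONDITION & SPEC =====

-- "x is removed by the sieve": x > iteration and iteration divides x
def remB (k x : Int) : Bool := decide (x > k) && (PySem.Int.mod x k == 0)

-- Pre_ excludes (a) the inputs where Python A raises ZeroDivisionError (iteration = 0 with a
-- positive element after the first; Python B raises there too), and (b) lists where a removable
-- multiple duplicates an earlier element: there A's list.remove picks the first matching
-- occurrence rather than the current one, a first-vs-last-match accident.
def Pre_excludeIteration (matrix : List Int) (iteration : Int) : Prop :=
  (iteration ≠ 0 ∨ ∀ i ∈ matrix.tail, i ≤ 0) ∧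
  List.Pairwise (fun a b => remB iteration b = true → b ≠ a) matrix
instance (matrix : List Int) (iteration : Int) : Decidable (Pre_excludeIteration matrix iteration) := by
  unfold Pre_excludeIteration; infer_instance

def pvWitness_excludeIteration : List Int × Int := ([5, 2, 6, 3], 2)

-- no two adjacent removable elements
def noAdjB (k : Int) : List Int → Bool
  | x :: y :: r => !(remB k x && remB k y) && noAdjB k (y :: r)
  | _ => true

def dBool (matrix : List Int) (k : Int) : Bool :=
  match matrix with
  | [] => false
  | _ :: t => !noAdjB k t

-- On lists whose tail contains two adjacent removable multiples, A's remove-while-iterating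
-- skips the element right after each removal and leaves that multiple in the result
-- (A([2,4,8,3],2)=[2,8,3]); B drops every later multiple ([2,3]), the intended sieve result.
def D_excludeIteration (matrix : List Int) (iteration : Int) : Prop :=
  dBool matrix iteration = true
instance (matrix : List Int) (iteration : Int) : Decidable (D_excludeIteration matrix iteration) := by
  unfold D_excludeIteration; infer_instance

def Spec_excludeIteration (matrix : List Int) (iteration : Int) (out : List Int) : Prop :=
  ¬ D_excludeIteration matrix iteration → out = excludeIteration_alt matrix iteration
instance (matrix : List Int) (iteration : Int) (out : List Int) : Decidable (Spec_excludeIteration matrix iteration out) := by unfold Spec_excludeIteration; infer_instance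

def pvDiffWitness_excludeIteration : List Int × Int := ([2, 4, 8, 3], 2)
def pvDiffWitnessOut_excludeIteration : (List Int) × (List Int) := ([2, 8, 3], [2, 3])

-- ===== CLAIM (what is proved, stated in full; the proofs are below) =====
def Claim_unchanged_excludeIteration : Prop := ∀ (matrix : List Int) (iteration : Int), Dom_excludeIteration matrix iteration → Pre_excludeIteration matrix iteration → Spec_excludeIteration matrix iteration (excludeIteration matrix iteration)
def Claim_changed_excludeIteration : Prop := Dom_excludeIteration (pvDiffWitness_excludeIteration.1) (pvDiffWitness_excludeIteration.2) ∧ Pre_excludeIteration (pvDiffWitness_excludeIteration.1) (pvDiffWitness_excludeIteration.2) ∧ D_excludeIteration (pvDiffWitness_excludeIteration.1) (pvDiffWitness_excludeIteration.2) ∧ excludeIteration (pvDiffWitness_excludeIteration.1) (pvDiffWitness_excludeIteration.2) = pvDiffWitnessOut_excludeIteration.1 ∧ excludeIteration_alt (pvDiffWitness_excludeIteration.1) (pvDiffWitness_excludeIteration.2) = pvDiffWitnessOut_excludeIteration.2 ∧ pvDiffWitnessOut_excludeIteration.1 ≠ pvDiffWitnessOut_excludeIteration.2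
def Claim_exact_excludeIteration : Prop := ∀ (matrix : List Int) (iteration : Int), Dom_excludeIteration matrix iteration → Pre_excludeIteration matrix iteration → D_excludeIteration matrix iteration → excludeIteration matrix iteration ≠ excludeIteration_alt matrix iteration

-- ===== LEMMAS AND PROOFS =====

theorem pyRemove_append_cons_of_not_mem (out t : List Int) (x : Int) (h : x ∉ out) :
    pyRemove (out ++ x :: t) x = out ++ t := by
  induction out with
  | nil => simp [pyRemove]
  | cons a o ih =>
    have hax : ¬ a = x := fun he => h (by simp [he])
    have hxo : x ∉ o := fun hm => h (by simp [hm])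
    simp [pyRemove, hax, ih hxo]

-- the kept-element filter of port B agrees with !remB
theorem keepB_eq (k x : Int) :
    (decide (x ≤ k) || !(PySem.Int.mod x k == 0)) = !remB k x := by
  unfold remB
  by_cases h : x ≤ k
  · have h2 : ¬ x > k := by omega
    simp [h, h2]
  · have h2 : x > k := by omega
    simp [h, h2]

-- what A's loop does to the tail: drop each removable element and skip the one after it
def aSim (k : Int) : List Int → List Int
  | [] => []
  | x :: r =>
    if remB k x = true then
      match r with
      | [] => []
      | y :: r' => y :: aSim k r'
    else x :: aSim k r

theorem aSim_nil (k : Int) : aSim k [] = [] := rfl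
theorem aSim_cons_neg (k x : Int) (r : List Int) (h : remB k x = false) :
    aSim k (x :: r) = x :: aSim k r := by
  rw [aSim.eq_def]; simp [h]
theorem aSim_cons_pos_nil (k x : Int) (h : remB k x = true) : aSim k [x] = [] := by
  rw [aSim.eq_def]; simp [h]
theorem aSim_cons_pos (k x y : Int) (r' : List Int) (h : remB k x = true) :
    aSim k (x :: y :: r') = y :: aSim k r' := by
  rw [aSim.eq_def]; simp [h]
theorem noAdjB_tail (k x : Int) (r : List Int) (h : noAdjB k (x :: r) = true) :
    noAdjB k r = true := by
  cases r with
  | nil => simp [noAdjB]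
  | cons y r' => simp [noAdjB] at h ⊢; exact h.2

theorem gen_loop (k : Int) : ∀ (n : Nat) (rest : List Int) (h : Int) (ds : List Int),
    rest.length ≤ n →
    (∀ x ∈ rest, remB k x = true → x ∉ h :: ds) →
    List.Pairwise (fun a b => remB k b = true → b ≠ a) rest →
    aLoop (h :: (ds ++ rest)) (ds.length + 1) k false
      = h :: (ds ++ aSim k rest) := by
  intro n
  induction n with
  | zero =>
    intro rest h ds hle _ _
    have : rest = [] := List.eq_nil_of_length_eq_zero (Nat.le_zero.1 hle)
    subst this
    rw [aLoop, dif_neg (by simp)]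
    simp [aSim_nil]
  | succ n ih =>
    intro rest h ds hle hrest hpw
    cases rest with
    | nil =>
      rw [aLoop, dif_neg (by simp)]
      simp [aSim_nil]
    | cons x r =>
      have hlen : ds.length + 1 < (h :: (ds ++ x :: r)).length := by simp
      have hx : (h :: (ds ++ x :: r))[ds.length + 1]'hlen = x := by
        simp only [List.getElem_cons_succ]
        simp [List.getElem_append_right (le_refl ds.length)]
      have hr_le : r.length ≤ n := by simp at hle; omega
      rw [aLoop, dif_pos hlen]
      simp only [hx]
      by_cases hrem : remB k x = true
      · have hgt : x > k := by
          unfold remB at hrem; simp at hrem; exact hrem.1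
        have hmod : PySem.Int.mod x k = 0 := by
          unfold remB at hrem; simp at hrem; exact hrem.2
        rw [if_pos (by exact ⟨hgt, by trivial⟩), if_pos hmod]
        have hxnot : x ∉ h :: ds := hrest x (by simp) hrem
        have hrm : pyRemove (h :: (ds ++ x :: r)) x = h :: (ds ++ r) := by
          have := pyRemove_append_cons_of_not_mem (h :: ds) r x hxnot
          simpa using this
        rw [hrm]
        cases r with
        | nil =>
          rw [aLoop, dif_neg (by simp)]
          simp [aSim_cons_pos_nil k x hrem]
        | cons y r' =>
          have step := ih r' h (ds ++ [y]) (by simp at hr_le ⊢; omega)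
            (by intro z hz hzrem
                have h1 := hrest z (by simp [hz]) hzrem
                have h2 : z ≠ y := (List.pairwise_cons.1 (List.pairwise_cons.1 hpw).2).1 z hz hzrem
                simp at h1
                simp [h1.1, h1.2, h2])
            ((List.pairwise_cons.1 (List.pairwise_cons.1 hpw).2).2)
          simp only [List.append_assoc, List.singleton_append, List.length_append,
            List.length_cons, List.length_nil] at step
          rw [aSim_cons_pos k x y r' hrem]
          simpa [Nat.add_assoc] using step
      · have hb : remB k x = false := by simpa using hrem
        have step := ih r h (ds ++ [x]) hr_le
          (by intro z hz hzrem
              have h1 := hrest z (by simp [hz]) hzrem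
              have h2 : z ≠ x := by
                intro he; rw [he] at hzrem; rw [hzrem] at hb; exact absurd hb (by decide)
              simp at h1
              simp [h1.1, h1.2, h2])
          ((List.pairwise_cons.1 hpw).2)
        simp only [List.append_assoc, List.singleton_append, List.length_append,
          List.length_cons, List.length_nil] at step
        have hfin : aLoop (h :: (ds ++ x :: r)) (ds.length + 1 + 1) k false
            = h :: (ds ++ x :: aSim k r) := by
          simpa [Nat.add_assoc] using step
        by_cases hgt : x > k
        · have hmod : ¬ PySem.Int.mod x k = 0 := by
            intro hm; unfold remB at hb; simp [hgt, hm] at hb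
          rw [if_pos (by exact ⟨hgt, by trivial⟩), if_neg hmod, hfin, aSim_cons_neg k x r hb]
        · rw [if_neg (by simp [hgt]), hfin, aSim_cons_neg k x r hb]

-- A's value on h :: t inside Pre_: head plus the skip-simulation of the tail
theorem a_eq_aSim (h : Int) (t : List Int) (k : Int)
    (hpw : List.Pairwise (fun a b => remB k b = true → b ≠ a) (h :: t)) :
    excludeIteration (h :: t) k = h :: aSim k t := by
  unfold excludeIteration
  have h0 : (0 : Nat) < (h :: t).length := by simp
  rw [aLoop, dif_pos h0]
  have hx0 : (h :: t)[0] = h := rfl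
  simp only [hx0]
  rw [if_neg (by simp)]
  have hcons := List.pairwise_cons.1 hpw
  have := gen_loop k t.length t h [] (le_refl _)
    (by intro z hz hzrem; simpa using (hcons.1 z hz hzrem))
    hcons.2
  simpa using this

theorem aSim_eq_filter (k : Int) : ∀ (n : Nat) (t : List Int), t.length ≤ n →
    noAdjB k t = true → aSim k t = t.filter (fun x => !remB k x) := by
  intro n
  induction n with
  | zero =>
    intro t hle _
    have : t = [] := List.eq_nil_of_length_eq_zero (Nat.le_zero.1 hle)
    subst this
    simp [aSim_nil]
  | succ n ih =>
    intro t hle hadj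
    cases t with
    | nil => simp [aSim_nil]
    | cons x r =>
      by_cases hrem : remB k x = true
      · cases r with
        | nil => simp [aSim_cons_pos_nil k x hrem, hrem]
        | cons y r' =>
          have hy : remB k y = false := by
            simp [noAdjB] at hadj
            rcases hadj.1 with h1 | h1
            · exact absurd h1 (by simp [hrem])
            · exact h1
          have hadj' : noAdjB k r' = true :=
            noAdjB_tail k y r' (noAdjB_tail k x (y :: r') hadj)
          rw [aSim_cons_pos k x y r' hrem,
            ih r' (by simp at hle; omega) hadj']
          simp [hrem, hy]
      · have hb : remB k x = false := by simpa using hrem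
        rw [aSim_cons_neg k x r hb, ih r (by simp at hle; omega) (noAdjB_tail k x r hadj)]
        simp [hb]

-- inside D_ the skip-simulation keeps a removable element
theorem aSim_has_rem (k : Int) : ∀ (n : Nat) (t : List Int), t.length ≤ n →
    noAdjB k t = false → ∃ z ∈ aSim k t, remB k z = true := by
  intro n
  induction n with
  | zero =>
    intro t hle hadj
    have : t = [] := List.eq_nil_of_length_eq_zero (Nat.le_zero.1 hle)
    subst this
    simp [noAdjB] at hadj
  | succ n ih =>
    intro t hle hadj
    cases t with
    | nil => simp [noAdjB] at hadj
    | cons x r =>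
      cases r with
      | nil => simp [noAdjB] at hadj
      | cons y r' =>
        by_cases hrem : remB k x = true
        · by_cases hy : remB k y = true
          · exact ⟨y, by simp [aSim_cons_pos k x y r' hrem], hy⟩
          · have hyb : remB k y = false := by simpa using hy
            have hr' : noAdjB k r' = false := by
              cases r' with
              | nil => simp [noAdjB, hrem, hyb] at hadj
              | cons w r'' =>
                simp [noAdjB, hyb] at hadj ⊢
                exact hadj
            obtain ⟨z, hz, hzrem⟩ := ih r' (by simp at hle; omega) hr'
            exact ⟨z, by simp [aSim_cons_pos k x y r' hrem, hz], hzrem⟩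
        · have hb : remB k x = false := by simpa using hrem
          have hr : noAdjB k (y :: r') = false := by
            simp [noAdjB, hb] at hadj ⊢
            exact hadj
          obtain ⟨z, hz, hzrem⟩ := ih (y :: r') (by simp at hle ⊢; omega) hr
          exact ⟨z, by rw [aSim_cons_neg k x (y :: r') hb]; exact List.mem_cons_of_mem x hz, hzrem⟩

theorem alt_eq_filter (matrix : List Int) (k : Int) :
    excludeIteration_alt matrix k
      = matrix.take 1 ++ (matrix.drop 1).filter (fun x => !remB k x) := by
  unfold excludeIteration_alt
  have h1 : PySem.List.slice matrix none (some 1) = matrix.take 1 := by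
    simpa using PySem.List.slice_to_natCast (xs := matrix) (b := 1)
  have h2 : PySem.List.slice matrix (some 1) none = matrix.drop 1 := by
    simpa using PySem.List.slice_from_natCast (xs := matrix) (a := 1)
  rw [h1, h2]
  congr 1
  exact List.filter_congr (fun x _ => keepB_eq k x)

-- ===== VERDICT (by name: the statements are the Claim_ definitions above) =====
theorem excludeIteration_spec : Claim_unchanged_excludeIteration := by
  intro matrix k _ hpre hnd
  rw [alt_eq_filter]
  cases matrix with
  | nil => unfold excludeIteration; rw [aLoop]; simp
  | cons h t =>
    have hadj : noAdjB k t = true := by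
      by_cases hdb : noAdjB k t = true
      · exact hdb
      · exact absurd (by unfold D_excludeIteration dBool; simpa using hdb) hnd
    rw [a_eq_aSim h t k hpre.2, aSim_eq_filter k t.length t (le_refl _) hadj]
    simp

theorem excludeIteration_changed : Claim_changed_excludeIteration := by
  unfold Claim_changed_excludeIteration
  refine ⟨by decide, by decide, by decide, ?_, by decide, by decide⟩
  show aLoop [2, 4, 8, 3] 0 2 true = [2, 8, 3]
  rw [aLoop, dif_pos (by decide), if_neg (by decide)]
  rw [aLoop, dif_pos (by decide), if_pos (by decide), if_pos (by decide)]
  show aLoop [2, 8, 3] 2 2 false = [2, 8, 3]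
  rw [aLoop, dif_pos (by decide), if_pos (by decide), if_neg (by decide)]
  rw [aLoop, dif_neg (by decide)]

theorem excludeIteration_tight : Claim_exact_excludeIteration := by
  intro matrix k _ hpre hd heq
  cases matrix with
  | nil => exact absurd hd (by unfold D_excludeIteration dBool; simp)
  | cons h t =>
    have hadj : noAdjB k t = false := by
      have : dBool (h :: t) k = true := hd
      unfold dBool at this
      simpa using this
    obtain ⟨z, hz, hzrem⟩ := aSim_has_rem k t.length t (le_refl _) hadj
    rw [a_eq_aSim h t k hpre.2, alt_eq_filter] at heq
    have : z ∈ (t.filter (fun x => !remB k x)) := by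
      have he : aSim k t = t.filter (fun x => !remB k x) := by
        have := heq
        simp at this
        exact this
      rw [← he]; exact hz
    have := List.of_mem_filter this
    simp [hzrem] at this
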